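-- pv_equiv track=rewrite | github.com/eugenioLR/Rubik-s-Cube-python | rubikNotation.py | reduceAxisTurns
-- ===== SOURCE A (Python) =====
-- def groupAlg(alg):
--     """
--     str -> list[str]
--     OBJ: groups the movements in an algorithm given by a string
--     RL'F2 -> [R,L',F2]
--     """
--     if type(alg) != list:
--         result=[]
--         item=[]
--         for i in range(len(alg)):
--             item.append(alg[i])
--             if len(item) >= 2 or i == len(alg)-1 or (alg[i+1] not in ("'", "2")):
--                 result.append("".join(item))
--                 item.clear()
--     else:
--         result = alg
--
--     return result
--
-- def reduceAxisTurns(alg):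
--     result = []
--     turns = ('x', 'y', 'z')
--     for turn in turns:
--         result = alg[:alg.find(turn)]
--         while(alg.find(turn) != -1):
--             auxAlg = groupAlg(alg[alg.find(turn)+1:])
--             alg = result
--     return alg
-- ===== SOURCE B (Python) =====
-- def reduceAxisTurns(alg):
--     idx = len(alg)
--     for turn in ('x', 'y', 'z'):
--         i = alg.find(turn)
--         if i != -1 and i < idx:
--             idx = i
--     return alg[:idx]
-- ===== Notes on version B (the rewrite author's own statement) =====
-- stated objective: simpler
-- what changed: B computes the minimum first-occurrence index of the three axis characters in one pass of three find calls and slices once, replacing A's per-axis truncation loop with its dead groupAlg call and while-based reassignment.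
import Mathlib
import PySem

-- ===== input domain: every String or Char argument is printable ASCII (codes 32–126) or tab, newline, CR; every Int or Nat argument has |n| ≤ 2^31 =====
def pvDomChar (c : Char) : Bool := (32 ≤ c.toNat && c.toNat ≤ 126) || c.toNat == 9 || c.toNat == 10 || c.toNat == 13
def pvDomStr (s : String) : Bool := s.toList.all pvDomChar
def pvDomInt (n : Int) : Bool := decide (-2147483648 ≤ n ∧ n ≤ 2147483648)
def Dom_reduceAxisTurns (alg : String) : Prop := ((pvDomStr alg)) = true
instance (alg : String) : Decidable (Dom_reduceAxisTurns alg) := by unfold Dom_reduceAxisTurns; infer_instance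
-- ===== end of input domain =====

-- B replaces A's per-axis truncation loop (with its dead groupAlg call and while-reassignment)
-- by one minimum-first-occurrence index and a single slice; objective: simpler.


-- ===== PORT A =====
-- groupAlg (the str branch; reduceAxisTurns only ever passes it a str slice)
def groupAlgChars (alg : List Char) : List (List Char) :=
  (PySem.List.pyRange 0 (alg.length : Int) 1).foldl
    (fun (st : List (List Char) × List Char) i =>
      let item := st.2 ++ [PySem.List.pyGetD alg i ' ']
      if item.length ≥ 2 ∨ i = (alg.length : Int) - 1 ∨
          ¬ (PySem.List.pyGetD alg (i + 1) ' ' ∈ (['\'', '2'] : List Char)) then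
        (st.1 ++ [item], [])
      else
        (st.1, item))
    ([], [])
  |>.1

-- the 'while(alg.find(turn) != -1): auxAlg = groupAlg(alg[alg.find(turn)+1:]); alg = result'
-- loop; fuel only makes the recursion total (alg.length + 1 steps always suffice, proved below)
def whileTurn (turn : List Char) (fuel : Nat) (alg result : List Char) : List Char :=
  match fuel with
  | 0 => alg
  | fuel + 1 =>
    if PySem.Chars.find alg turn ≠ -1 then
      let _auxAlg := groupAlgChars (PySem.Chars.slice alg (some (PySem.Chars.find alg turn + 1)) none)
      whileTurn turn fuel result result
    else alg

def reduceAxisTurns (alg : String) : String :=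
  String.mk
    ((([['x'], ['y'], ['z']] : List (List Char)).foldl
      (fun alg turn =>
        let result := PySem.Chars.slice alg none (some (PySem.Chars.find alg turn))
        whileTurn turn (alg.length + 1) alg result)
      alg.toList))

-- ===== PORT B =====
def reduceAxisTurns_alt (alg : String) : String :=
  let cs := alg.toList
  let idx := (([['x'], ['y'], ['z']] : List (List Char)).foldl
    (fun idx turn =>
      let i := PySem.Chars.find cs turn
      if i ≠ -1 ∧ i < idx then i else idx)
    (cs.length : Int))
  String.mk (PySem.Chars.slice cs none (some idx))

-- ===== PRECONDITION & SPEC =====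
def Spec_reduceAxisTurns (alg : String) (out : String) : Prop := out = reduceAxisTurns_alt alg
instance (alg : String) (out : String) : Decidable (Spec_reduceAxisTurns alg out) := by unfold Spec_reduceAxisTurns; infer_instance

-- ===== CLAIM (what is proved, stated in full; the proofs are below) =====
def Claim_equal_reduceAxisTurns : Prop := ∀ (alg : String), Dom_reduceAxisTurns alg → Spec_reduceAxisTurns alg (reduceAxisTurns alg)

-- ===== LEMMAS AND PROOFS =====

theorem findIdx_lt_of_mem (cs : List Char) (c : Char) (h : c ∈ cs) : cs.findIdx (· == c) < cs.length :=
  List.findIdx_lt_length_of_exists ⟨c, h, by simp⟩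

theorem findIdx_eq_length_of_not_mem (cs : List Char) (c : Char) (h : c ∉ cs) :
    cs.findIdx (· == c) = cs.length := by
  induction cs with
  | nil => rfl
  | cons a t ih =>
    simp only [List.mem_cons, not_or] at h
    have hac : (a == c) = false := by
      simp only [beq_eq_false_iff_ne]
      exact fun e => h.1 e.symm
    simp [List.findIdx_cons, hac, ih h.2]

theorem getElem_findIdx (cs : List Char) (c : Char) (h : cs.findIdx (· == c) < cs.length) :
    cs[cs.findIdx (· == c)] = c := by
  have := List.findIdx_getElem (w := h); simpa using this

theorem ne_of_lt_findIdx (cs : List Char) (c : Char) (i : Nat) (hi : i < cs.findIdx (· == c))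
    (hl : i < cs.length) : cs[i] ≠ c := by
  have := List.not_of_lt_findIdx hi; simpa using this

theorem findIdx_take (cs : List Char) (c : Char) (k : Nat) :
    (cs.take k).findIdx (· == c) = min (cs.findIdx (· == c)) k := by
  induction cs generalizing k with
  | nil => simp
  | cons a t ih =>
    cases k with
    | zero => simp
    | succ k =>
      by_cases h : (a == c) = true
      · simp only [List.take_succ_cons, List.findIdx_cons, h, cond_true]
        omega
      · simp only [List.take_succ_cons, List.findIdx_cons, h, cond_false, ih]
        omega

theorem singleton_prefix_drop (cs : List Char) (c : Char) (i : Nat) :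
    [c] <+: cs.drop i ↔ cs[i]? = some c := by
  constructor
  · rintro ⟨t, ht⟩
    have : (cs.drop i)[0]? = some c := by rw [← ht]; rfl
    simpa using this
  · intro h
    have hi : i < cs.length := by
      by_contra hl
      rw [List.getElem?_eq_none (by omega : cs.length ≤ i)] at h
      simp at h
    refine ⟨cs.drop (i + 1), ?_⟩
    rw [List.drop_eq_getElem_cons hi]
    simp_all

-- Chars.find of a one-character needle is List.findIdx
theorem find_singleton (cs : List Char) (c : Char) :
    PySem.Chars.find cs [c] = if c ∈ cs then (cs.findIdx (· == c) : Int) else -1 := by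
  by_cases h : c ∈ cs
  · have hnn : 0 ≤ PySem.Chars.find cs [c] := by
      rw [PySem.Chars.find_nonneg_iff, List.singleton_infix_iff]; exact h
    obtain ⟨hpre, hmin⟩ := PySem.Chars.find_spec (s := cs) (sub := [c]) hnn
    set n := (PySem.Chars.find cs [c]).toNat with hn
    rw [singleton_prefix_drop] at hpre
    have hnl : n < cs.length := by
      by_contra hl
      rw [List.getElem?_eq_none (by omega : cs.length ≤ n)] at hpre
      simp at hpre
    have hget : cs[n] = c := by
      have := List.getElem?_eq_getElem hnl
      rw [this] at hpre; exact Option.some.inj hpre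
    have heq : cs.findIdx (· == c) = n := by
      apply le_antisymm
      · by_contra hlt
        exact ne_of_lt_findIdx cs c n (by omega) hnl hget
      · by_contra hlt
        have hfl : cs.findIdx (· == c) < cs.length := by omega
        have := hmin (cs.findIdx (· == c)) (by omega)
        rw [singleton_prefix_drop, List.getElem?_eq_getElem hfl] at this
        exact this (by rw [getElem_findIdx cs c hfl])
    rw [if_pos h, heq, hn]
    omega
  · rw [if_neg h]
    rw [PySem.Chars.find_eq_neg_one_iff, List.singleton_infix_iff]
    exact h

-- one iteration of A's outer for-loop returns the prefix before the first occurrence of turn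
theorem stepA_eq (cs : List Char) (c : Char) :
    whileTurn [c] (cs.length + 1) cs
      (PySem.Chars.slice cs none (some (PySem.Chars.find cs [c])))
      = cs.take (cs.findIdx (· == c)) := by
  by_cases h : c ∈ cs
  · have hfind : PySem.Chars.find cs [c] = (cs.findIdx (· == c) : Int) := by
      rw [find_singleton, if_pos h]
    have hlt : cs.findIdx (· == c) < cs.length := findIdx_lt_of_mem cs c h
    have hres : PySem.Chars.slice cs none (some (PySem.Chars.find cs [c]))
        = cs.take (cs.findIdx (· == c)) := by
      rw [hfind]
      simp [PySem.Chars.slice_eq_listSlice, PySem.List.slice_to_natCast]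
    obtain ⟨m, hm⟩ : ∃ m, cs.length = m + 1 := ⟨cs.length - 1, by omega⟩
    have hnotmem : c ∉ cs.take (cs.findIdx (· == c)) := by
      intro hmem
      have h1 := findIdx_lt_of_mem _ c hmem
      have h2 := findIdx_take cs c (cs.findIdx (· == c))
      simp only [List.length_take] at h1
      omega
    have hfind2 : PySem.Chars.find (cs.take (cs.findIdx (· == c))) [c] = -1 := by
      rw [find_singleton, if_neg hnotmem]
    rw [hres, hm]
    rw [whileTurn, if_pos (by rw [hfind]; omega)]
    show whileTurn [c] (m + 1) (cs.take (cs.findIdx (· == c))) (cs.take (cs.findIdx (· == c))) = _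
    rw [whileTurn, if_neg (by rw [hfind2]; simp)]
  · have hfind : PySem.Chars.find cs [c] = -1 := by
      rw [find_singleton, if_neg h]
    rw [whileTurn, if_neg (by rw [hfind]; simp)]
    rw [findIdx_eq_length_of_not_mem cs c h, List.take_length]

-- one iteration of B's loop keeps the minimum first-occurrence index
theorem stepB_eq (cs : List Char) (c : Char) (k : Nat) (hk : k ≤ cs.length) :
    (if PySem.Chars.find cs [c] ≠ -1 ∧ PySem.Chars.find cs [c] < ((k : Nat) : Int)
      then PySem.Chars.find cs [c] else ((k : Nat) : Int))
      = ((min (cs.findIdx (· == c)) k : Nat) : Int) := by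
  by_cases h : c ∈ cs
  · have hfind : PySem.Chars.find cs [c] = (cs.findIdx (· == c) : Int) := by
      rw [find_singleton, if_pos h]
    rw [hfind]
    by_cases hlt : cs.findIdx (· == c) < k
    · rw [if_pos ⟨by omega, by exact_mod_cast hlt⟩]
      push_cast; omega
    · rw [if_neg (by rintro ⟨-, hc⟩; exact hlt (by exact_mod_cast hc))]
      push_cast; omega
  · have hfind : PySem.Chars.find cs [c] = -1 := by
      rw [find_singleton, if_neg h]
    rw [hfind, if_neg (by simp)]
    have := findIdx_eq_length_of_not_mem cs c h
    push_cast; omega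

-- ===== VERDICT (by name: the statement is the Claim_ definition above) =====
theorem reduceAxisTurns_spec : Claim_equal_reduceAxisTurns := by
  unfold Claim_equal_reduceAxisTurns
  intro alg _
  unfold Spec_reduceAxisTurns reduceAxisTurns reduceAxisTurns_alt
  simp only [List.foldl]
  rw [stepA_eq, stepA_eq, stepA_eq]
  rw [stepB_eq _ 'x' alg.toList.length le_rfl]
  rw [stepB_eq _ 'y' _ (by omega)]
  rw [stepB_eq _ 'z' _ (by omega)]
  simp only [findIdx_take]
  simp only [List.take_take, PySem.Chars.slice_eq_listSlice, PySem.List.slice_to_natCast]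
  congr 1
  have h1 : alg.toList.findIdx (· == 'x') ≤ alg.toList.length := List.findIdx_le_length
  have h2 : alg.toList.findIdx (· == 'y') ≤ alg.toList.length := List.findIdx_le_length
  have h3 : alg.toList.findIdx (· == 'z') ≤ alg.toList.length := List.findIdx_le_length
  congr 1
  omega
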